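-- pv_equiv track=rewrite | github.com/Ana-MariaDuminica/FormGenerator | app.py | get_passages
-- ===== SOURCE A (Python) =====
-- def get_passages(file_content):
--
--     passages = []
--     current_passage = ""
--     for char in file_content:
--         if char == '_':
--             current_passage += char
--         else:
--             if current_passage:
--                 passages.append(current_passage)
--                 current_passage = ""
--     if current_passage:
--         passages.append(current_passage)
--     return passages
-- ===== SOURCE B (Python) =====
-- def get_passages(file_content):
--     return ''.join(c if c == '_' else ' ' for c in file_content).split()
-- ===== Notes on version B (the rewrite author's own statement) =====
-- stated objective: idiomatic
-- what changed: Replaces the manual accumulator/flush state machine with a one-liner: map every non-underscore character to a space and let str.split() extract the underscore runs.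
import Mathlib
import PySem

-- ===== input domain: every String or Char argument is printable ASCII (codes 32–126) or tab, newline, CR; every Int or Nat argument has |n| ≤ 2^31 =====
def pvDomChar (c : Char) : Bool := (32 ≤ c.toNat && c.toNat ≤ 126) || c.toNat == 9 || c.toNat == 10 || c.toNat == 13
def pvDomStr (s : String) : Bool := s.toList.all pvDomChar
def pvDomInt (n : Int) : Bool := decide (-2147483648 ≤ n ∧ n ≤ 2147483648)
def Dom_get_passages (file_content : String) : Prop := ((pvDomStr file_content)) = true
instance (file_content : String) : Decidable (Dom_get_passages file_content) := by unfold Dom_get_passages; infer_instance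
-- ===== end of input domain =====

-- B replaces A's manual accumulator/flush state machine by mapping every non-underscore
-- character to a space and calling str.split(); same output, more idiomatic.


-- ===== PORT A =====
-- A's loop: state (passages, current_passage); current_passage kept as List Char, turned
-- into a String exactly where A appends it to passages.
def getPassagesLoop : List Char → List String → List Char → List String
  | [], passages, cur => if cur ≠ [] then passages ++ [String.ofList cur] else passages
  | c :: rest, passages, cur =>
    if c = '_' then getPassagesLoop rest passages (cur ++ [c])
    else if cur ≠ [] then getPassagesLoop rest (passages ++ [String.ofList cur]) []
    else getPassagesLoop rest passages cur

def get_passages (file_content : String) : List String :=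
  getPassagesLoop file_content.toList [] []

-- ===== PORT B =====
-- ''.join(c if c == '_' else ' ' for c in file_content).split()
def get_passages_alt (file_content : String) : List String :=
  PySem.Str.split₀
    (String.ofList (file_content.toList.map (fun c => if c = '_' then c else ' ')))

-- ===== PRECONDITION & SPEC =====
def Spec_get_passages (file_content : String) (out : List String) : Prop := out = get_passages_alt file_content
instance (file_content : String) (out : List String) : Decidable (Spec_get_passages file_content out) := by unfold Spec_get_passages; infer_instance

-- ===== CLAIM (what is proved, stated in full; the proofs are below) =====
def Claim_equal_get_passages : Prop := ∀ (file_content : String), Dom_get_passages file_content → Spec_get_passages file_content (get_passages file_content)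

-- ===== LEMMAS AND PROOFS =====

-- split₀.go's accumulator is just prepended (reversed) to the result.
theorem split0_go_acc (l : List Char) : ∀ (cur : List Char) (acc : List (List Char)),
    PySem.Chars.split₀.go l cur acc = acc.reverse ++ PySem.Chars.split₀.go l cur [] := by
  induction l with
  | nil =>
    intro cur acc
    simp only [PySem.Chars.split₀.go]
    by_cases h : cur.isEmpty <;> simp [h]
  | cons c rest ih =>
    intro cur acc
    simp only [PySem.Chars.split₀.go]
    by_cases hs : PySem.Chars.isspace c
    · by_cases h : cur.isEmpty
      · simp only [hs, h, if_true]
        exact ih [] acc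
      · simp only [hs, h, if_true, if_false, Bool.false_eq_true]
        rw [ih [] (cur.reverse :: acc), ih [] [cur.reverse]]
        simp
    · simp only [hs, Bool.false_eq_true, if_false]
      rw [ih (c :: cur) acc]

theorem isspace_mapped (c : Char) :
    PySem.Chars.isspace (if c = '_' then c else ' ') = !(c = '_' : Bool) := by
  by_cases h : c = '_'
  · subst h; decide
  · rw [if_neg h]; simp only [decide_eq_false h, Bool.not_false]; decide

-- Main invariant: A's loop over cs with pending run cur equals B's split₀.go over the
-- space-mapped cs with go-state cur.reverse.
theorem loop_eq_go (cs : List Char) : ∀ (passages : List String) (cur : List Char),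
    getPassagesLoop cs passages cur =
      passages ++
        (PySem.Chars.split₀.go (cs.map (fun c => if c = '_' then c else ' '))
          cur.reverse []).map String.ofList := by
  induction cs with
  | nil =>
    intro passages cur
    simp only [getPassagesLoop, List.map_nil, PySem.Chars.split₀.go]
    by_cases h : cur = []
    · subst h; simp
    · simp [h]
  | cons c rest ih =>
    intro passages cur
    simp only [getPassagesLoop, List.map_cons, PySem.Chars.split₀.go, isspace_mapped]
    by_cases hc : c = '_'
    · simp only [hc, if_true, decide_true, Bool.not_true, Bool.false_eq_true, if_false]
      rw [ih passages (cur ++ ['_'])]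
      simp
    · simp only [hc, if_false, decide_false, Bool.not_false, if_true]
      by_cases h : cur = []
      · subst h; simp [ih]
      · have h1 : (cur.reverse.isEmpty = true) = False := by simp [h]
        simp only [h, h1, if_false, ne_eq, List.reverse_reverse]
        rw [split0_go_acc, ih (passages ++ [String.ofList cur]) []]
        simp

-- ===== VERDICT (by name: the statement is the Claim_ definition above) =====
theorem get_passages_spec : Claim_equal_get_passages := by
  intro s _
  show get_passages s = get_passages_alt s
  unfold get_passages get_passages_alt PySem.Str.split₀ PySem.Chars.split₀
  rw [loop_eq_go]
  simp
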